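-- pv_equiv track=rewrite | github.com/julioguzmanb/XRDpy | src/trxrdpy/analysis/common/general_utils.py | scan_tag
-- ===== SOURCE A (Python) =====
-- from typing import Any, List, Optional, Sequence, Tuple, TypeVar, Union
--
-- def scan_tag(scans: Union[int, Sequence[int]]) -> str:
--     """
--     Folder-style scan tag:
--       - int -> "scan_167246"
--       - [167246,167285] -> "scans_167246-167285"
--     """
--     if isinstance(scans, int):
--         return f"scan_{int(scans)}"
--     ss = [int(s) for s in list(scans)]
--     if len(ss) == 0:
--         return "scans_unknown"
--     ss = sorted(ss)
--     if len(ss) == 1: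
--         return f"scan_{ss[0]}"
--     return f"scans_{ss[0]}-{ss[-1]}"
-- ===== SOURCE B (Python) =====
-- def scan_tag(scans):
--     """
--     Folder-style scan tag:
--       - int -> "scan_167246"
--       - [167246,167285] -> "scans_167246-167285"
--     """
--     if isinstance(scans, int):
--         return f"scan_{int(scans)}"
--     ss = [int(s) for s in list(scans)]
--     if len(ss) == 0:
--         return "scans_unknown"
--     if len(ss) == 1:
--         return f"scan_{ss[0]}"
--     lo = hi = ss[0]
--     for x in ss[1:]:
--         if x < lo:
--             lo = x
--         if x > hi:
--             hi = x
--     return f"scans_{lo}-{hi}"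
-- ===== Notes on version B (the rewrite author's own statement) =====
-- stated objective: alternative
-- what changed: Replaces the sort with a single linear scan maintaining running min/max, since only the extremes of the list are needed.
import Mathlib
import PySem

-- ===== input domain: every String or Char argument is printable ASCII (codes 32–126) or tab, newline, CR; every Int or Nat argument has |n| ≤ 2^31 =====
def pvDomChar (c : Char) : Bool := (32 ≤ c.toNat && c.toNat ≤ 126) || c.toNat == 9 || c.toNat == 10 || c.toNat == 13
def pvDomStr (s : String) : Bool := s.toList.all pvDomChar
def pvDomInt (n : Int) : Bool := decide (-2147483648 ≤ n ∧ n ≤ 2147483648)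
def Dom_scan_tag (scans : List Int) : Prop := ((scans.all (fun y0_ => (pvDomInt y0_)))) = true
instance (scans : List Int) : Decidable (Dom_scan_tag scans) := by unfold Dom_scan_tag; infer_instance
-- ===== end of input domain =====

-- B replaces A's sort with a single linear pass keeping running min/max (only the extremes are needed).
-- The list-argument branch of the Python is ported (the Union's int branch is outside the List Int signature).

-- ===== PORT A =====
-- A: empty guard, sort, then first/last element of the sorted list (indices 0 and -1 are always in range here).
def scan_tag (scans : List Int) : String :=
  if scans.length = 0 then "scans_unknown"
  else
    let ss := PySem.List.sorted scans (fun x => x) false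
    if ss.length = 1 then "scan_" ++ PySem.Int.toStr (PySem.List.pyGetD ss 0 0)
    else "scans_" ++ PySem.Int.toStr (PySem.List.pyGetD ss 0 0) ++ "-" ++ PySem.Int.toStr (PySem.List.pyGetD ss (-1) 0)

-- ===== PORT B =====
-- B: lo = hi = ss[0]; one pass over ss[1:] updating lo/hi.
def scan_tag_alt (scans : List Int) : String :=
  match scans with
  | [] => "scans_unknown"
  | [x] => "scan_" ++ PySem.Int.toStr x
  | x :: rest =>
    let p := rest.foldl (fun (p : Int × Int) y =>
      (if y < p.1 then y else p.1, if y > p.2 then y else p.2)) (x, x)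
    "scans_" ++ PySem.Int.toStr p.1 ++ "-" ++ PySem.Int.toStr p.2

-- ===== PRECONDITION & SPEC =====
def Spec_scan_tag (scans : List Int) (out : String) : Prop := out = scan_tag_alt scans
instance (scans : List Int) (out : String) : Decidable (Spec_scan_tag scans out) := by unfold Spec_scan_tag; infer_instance

-- ===== CLAIM (what is proved, stated in full; the proofs are below) =====
def Claim_equal_scan_tag : Prop := ∀ (scans : List Int), Dom_scan_tag scans → Spec_scan_tag scans (scan_tag scans)

-- ===== LEMMAS AND PROOFS =====

-- B's fold starting from (a, b) yields a first component that is a or an element of the list and a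
-- lower bound of both, and dually a second component that is b or an element and an upper bound.
theorem fold_mm (rest : List Int) : ∀ (a b : Int),
    let p := rest.foldl (fun (p : Int × Int) y =>
      (if y < p.1 then y else p.1, if y > p.2 then y else p.2)) (a, b)
    (p.1 = a ∨ p.1 ∈ rest) ∧ p.1 ≤ a ∧ (∀ y ∈ rest, p.1 ≤ y) ∧
    (p.2 = b ∨ p.2 ∈ rest) ∧ b ≤ p.2 ∧ (∀ y ∈ rest, y ≤ p.2) := by
  induction rest with
  | nil => intro a b; simp
  | cons z zs ih =>
    intro a b
    simp only [List.foldl_cons]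
    obtain ⟨h1, h2, h3, h4, h5, h6⟩ := ih (if z < a then z else a) (if z > b then z else b)
    refine ⟨?_, ?_, ?_, ?_, ?_, ?_⟩
    · rcases h1 with h | h
      · by_cases hz : z < a
        · refine Or.inr (List.mem_cons.mpr (Or.inl ?_)); rw [h, if_pos hz]
        · refine Or.inl ?_; rw [h, if_neg hz]
      · exact Or.inr (List.mem_cons.mpr (Or.inr h))
    · refine le_trans h2 ?_; split <;> omega
    · intro y hy
      rcases List.mem_cons.mp hy with rfl | hy
      · refine le_trans h2 ?_; split <;> omega
      · exact h3 y hy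
    · rcases h4 with h | h
      · by_cases hz : z > b
        · refine Or.inr (List.mem_cons.mpr (Or.inl ?_)); rw [h, if_pos hz]
        · refine Or.inl ?_; rw [h, if_neg hz]
      · exact Or.inr (List.mem_cons.mpr (Or.inr h))
    · refine le_trans ?_ h5; split <;> omega
    · intro y hy
      rcases List.mem_cons.mp hy with rfl | hy
      · refine le_trans ?_ h5; split <;> omega
      · exact h6 y hy

-- First (index 0) and last (index -1) of the sorted nonempty list are its minimum and maximum.
theorem sorted_head_last (x : Int) (rest : List Int)
    (m M : Int) (hm : m ∈ x :: rest) (hml : ∀ y ∈ x :: rest, m ≤ y)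
    (hM : M ∈ x :: rest) (hMu : ∀ y ∈ x :: rest, y ≤ M) :
    PySem.List.pyGetD (PySem.List.sorted (x :: rest) (fun x => x) false) 0 0 = m ∧
    PySem.List.pyGetD (PySem.List.sorted (x :: rest) (fun x => x) false) (-1) 0 = M := by
  have hne : PySem.List.sorted (x :: rest) (fun x => x) false ≠ [] := by
    intro h
    have := (PySem.List.sorted_eq_nil_iff (x :: rest) (fun x => x) false).mp h
    simp at this
  obtain ⟨h, t, hht⟩ : ∃ h t, PySem.List.sorted (x :: rest) (fun x => x) false = h :: t := by
    cases hc : PySem.List.sorted (x :: rest) (fun x => x) false with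
    | nil => exact absurd hc hne
    | cons h t => exact ⟨h, t, rfl⟩
  constructor
  · rw [hht, PySem.List.pyGetD_zero_cons]
    have hmem : h ∈ x :: rest := by
      have : h ∈ PySem.List.sorted (x :: rest) (fun x => x) false := by
        rw [hht]; exact List.mem_cons_self
      exact (PySem.List.mem_sorted _ _ _ _).mp this
    have hle := PySem.List.key_head_sorted_le (x :: rest) (fun x => x) hht
    exact le_antisymm (hle m hm) (hml h hmem)
  · rw [PySem.List.pyGetD_neg_one _ _ hne]
    have hlen : 0 < (PySem.List.sorted (x :: rest) (fun x => x) false).length :=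
      List.length_pos_iff.mpr hne
    have hmem : (PySem.List.sorted (x :: rest) (fun x => x) false).getLast hne ∈ x :: rest := by
      have := List.getLast_mem hne
      exact (PySem.List.mem_sorted _ _ _ _).mp this
    have hMs : M ∈ PySem.List.sorted (x :: rest) (fun x => x) false :=
      (PySem.List.mem_sorted _ _ _ _).mpr hM
    obtain ⟨p, hp, hpe⟩ := List.mem_iff_getElem.mp hMs
    have hlast := List.getLast_eq_getElem hne
    have hmono := PySem.List.sorted_id_getElem_mono (x :: rest)
      (p := p) (q := (PySem.List.sorted (x :: rest) (fun x => x) false).length - 1)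
      (by omega) (by omega)
    rw [hpe] at hmono
    rw [hlast] at hmem ⊢
    exact le_antisymm (hMu _ hmem) hmono

-- ===== VERDICT (by name: the statement is the Claim_ definition above) =====
theorem scan_tag_spec : Claim_equal_scan_tag := by
  intro scans _
  show scan_tag scans = scan_tag_alt scans
  match scans with
  | [] => rfl
  | [x] =>
    have hs : PySem.List.sorted [x] (fun x => x) false = [x] :=
      PySem.List.sorted_eq_self_of_pairwise [x] (fun x => x) (by simp)
    simp [scan_tag, scan_tag_alt, hs, PySem.List.pyGetD_zero_cons]
  | x :: y :: rest =>
    have hlen0 : (x :: y :: rest).length ≠ 0 := by simp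
    have hlen1 : (PySem.List.sorted (x :: y :: rest) (fun x => x) false).length ≠ 1 := by
      rw [PySem.List.length_sorted]; simp
    obtain ⟨h1, h2, h3, h4, h5, h6⟩ := fold_mm (y :: rest) x x
    set p := (y :: rest).foldl (fun (p : Int × Int) y =>
      (if y < p.1 then y else p.1, if y > p.2 then y else p.2)) (x, x) with hp
    have hm : p.1 ∈ x :: y :: rest := by
      rcases h1 with h | h
      · exact h ▸ List.mem_cons_self
      · exact List.mem_cons_of_mem _ h
    have hml : ∀ z ∈ x :: y :: rest, p.1 ≤ z := by
      intro z hz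
      rcases List.mem_cons.mp hz with rfl | hz
      · exact h2
      · exact h3 z hz
    have hM : p.2 ∈ x :: y :: rest := by
      rcases h4 with h | h
      · exact h ▸ List.mem_cons_self
      · exact List.mem_cons_of_mem _ h
    have hMu : ∀ z ∈ x :: y :: rest, z ≤ p.2 := by
      intro z hz
      rcases List.mem_cons.mp hz with rfl | hz
      · exact h5
      · exact h6 z hz
    obtain ⟨hhead, hlast⟩ := sorted_head_last x (y :: rest) p.1 p.2 hm hml hM hMu
    simp only [scan_tag, scan_tag_alt, if_neg hlen0, if_neg hlen1, hhead, hlast, ← hp]
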